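-- pv_equiv track=rewrite | github.com/shadyapoelela-cloud/apex-web | app/coa_engine/services/hierarchy_builder.py | _detect_cycles_readonly
-- ===== SOURCE A (Python) =====
-- from typing import Dict, List, Optional, Set, Tuple
--
-- def _detect_cycles_readonly(hierarchy: Dict[str, Dict]) -> List[List[str]]:
--     """Detect cycles without modifying the hierarchy (for validation)."""
--     if not hierarchy:
--         return []
--
--     visited: Set[str] = set()
--     in_stack: Set[str] = set()
--     cycles: List[List[str]] = []
--
--     def _dfs(code: str, path: List[str]) -> None:
--         if code in in_stack:
--             cycle_start = path.index(code)
--             cycles.append(path[cycle_start:])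
--             return
--         if code in visited:
--             return
--
--         visited.add(code)
--         in_stack.add(code)
--         path.append(code)
--
--         parent = hierarchy.get(code, {}).get("parent_code")
--         if parent and parent in hierarchy:
--             _dfs(parent, path)
--
--         path.pop()
--         in_stack.discard(code)
--
--     for code in hierarchy:
--         if code not in visited:
--             _dfs(code, [])
--
--     return cycles
-- ===== SOURCE B (Python) =====
-- def _detect_cycles_readonly(hierarchy):
--     """Iterative chain-walk: one while-loop per unvisited start node; a
--     position dict replaces the recursion's in_stack set and path.index scan."""
--     visited = set()
--     cycles = []
--     for start in hierarchy:
--         if start in visited: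
--             continue
--         pos = {}
--         path = []
--         code = start
--         while True:
--             if code in pos:
--                 cycles.append(path[pos[code]:])
--                 break
--             if code in visited:
--                 break
--             visited.add(code)
--             pos[code] = len(path)
--             path.append(code)
--             parent = hierarchy.get(code, {}).get("parent_code")
--             if parent and parent in hierarchy:
--                 code = parent
--             else:
--                 break
--     return cycles
-- ===== Notes on version B (the rewrite author's own statement) =====
-- stated objective: alternative
-- what changed: Replaced A's recursive _dfs (shared in_stack set, mutable path with push/pop, and a path.index scan to slice the cycle) by an iterative per-start while-loop chain walk whose position dictionary records each node's index on the path, subsuming both the in_stack membership test and the path.index scan.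
import Mathlib
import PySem

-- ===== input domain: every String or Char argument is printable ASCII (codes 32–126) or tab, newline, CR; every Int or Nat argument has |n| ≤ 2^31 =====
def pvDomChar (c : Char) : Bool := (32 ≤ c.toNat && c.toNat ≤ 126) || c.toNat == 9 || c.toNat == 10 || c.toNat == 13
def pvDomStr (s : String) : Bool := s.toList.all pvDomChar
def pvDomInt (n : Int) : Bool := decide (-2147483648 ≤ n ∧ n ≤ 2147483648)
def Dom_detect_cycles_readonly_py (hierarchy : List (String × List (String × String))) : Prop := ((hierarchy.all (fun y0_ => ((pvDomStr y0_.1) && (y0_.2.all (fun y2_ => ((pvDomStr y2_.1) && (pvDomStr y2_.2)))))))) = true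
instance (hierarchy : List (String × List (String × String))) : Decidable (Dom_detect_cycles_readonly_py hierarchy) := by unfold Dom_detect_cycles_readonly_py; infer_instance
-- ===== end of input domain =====

-- B replaces A's recursive DFS by an iterative per-start chain walk whose position
-- dictionary subsumes both the in_stack set and the path.index scan (alternative decomposition).


-- ===== PORT A =====
-- A's recursive _dfs. State: (visited, cycles) is returned; path/in_stack are restored by
-- A before returning, so they are plain arguments here. The fuel `hierarchy.length + 1`
-- is a totality guard only: each recursive call first adds an unvisited hierarchy key to
-- `visited`, so the recursion depth never exceeds the number of keys plus one.
def pvDfsA (hierarchy : List (String × List (String × String))) :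
    Nat → String → List String → PySem.Set String → PySem.Set String → List (List String) →
    PySem.Set String × List (List String)
  | 0, _, _, visited, _, cycles => (visited, cycles)
  | fuel + 1, code, path, visited, in_stack, cycles =>
    if PySem.Set.contains in_stack code then
      -- cycle_start = path.index(code); cycles.append(path[cycle_start:])
      match PySem.List.index? path code with
      | some i => (visited, cycles ++ [PySem.List.slice path (some (i : Int)) none])
      | none => (visited, cycles)  -- unreachable: code ∈ in_stack always lies on path
    else if PySem.Set.contains visited code then
      (visited, cycles)
    else
      let visited' := PySem.Set.add visited code
      let in_stack' := PySem.Set.add in_stack code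
      let path' := path ++ [code]
      -- parent = hierarchy.get(code, {}).get("parent_code")
      match List.lookup "parent_code" ((List.lookup code hierarchy).getD []) with
      | some parent =>
        -- if parent and parent in hierarchy: _dfs(parent, path)
        if parent ≠ "" ∧ (List.lookup parent hierarchy).isSome then
          pvDfsA hierarchy fuel parent path' visited' in_stack' cycles
        else (visited', cycles)
      | none => (visited', cycles)

def detect_cycles_readonly_py (hierarchy : List (String × List (String × String))) : List (List String) :=
  if hierarchy = [] then [] else
  (hierarchy.foldl
    (fun (st : PySem.Set String × List (List String)) kv =>
      if PySem.Set.contains st.1 kv.1 then st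
      else pvDfsA hierarchy (hierarchy.length + 1) kv.1 [] st.1 [] st.2)
    (([] : PySem.Set String), ([] : List (List String)))).2

-- ===== PORT B =====
-- B's while-loop: one step per iteration; `pos` maps each path element to its index.
-- Same fuel bound as A's port, and a totality guard only, for the same reason.
def pvWalkB (hierarchy : List (String × List (String × String))) :
    Nat → String → List String → PySem.Dict String Int → PySem.Set String → List (List String) →
    PySem.Set String × List (List String)
  | 0, _, _, _, visited, cycles => (visited, cycles)
  | fuel + 1, code, path, pos, visited, cycles =>
    match PySem.Dict.get? pos code with
    | some i => (visited, cycles ++ [PySem.List.slice path (some i) none])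
    | none =>
      if PySem.Set.contains visited code then (visited, cycles)
      else
        let visited' := PySem.Set.add visited code
        let pos' := PySem.Dict.insert pos code (path.length : Int)
        let path' := path ++ [code]
        match List.lookup "parent_code" ((List.lookup code hierarchy).getD []) with
        | some parent =>
          if parent ≠ "" ∧ (List.lookup parent hierarchy).isSome then
            pvWalkB hierarchy fuel parent path' pos' visited' cycles
          else (visited', cycles)
        | none => (visited', cycles)

-- B's outer for-loop over the dict's keys, as structural recursion.
def pvOuterB (hierarchy : List (String × List (String × String))) :
    List (String × List (String × String)) → PySem.Set String → List (List String) → List (List String)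
  | [], _, cycles => cycles
  | kv :: rest, visited, cycles =>
    if PySem.Set.contains visited kv.1 then pvOuterB hierarchy rest visited cycles
    else
      let r := pvWalkB hierarchy (hierarchy.length + 1) kv.1 [] PySem.Dict.empty visited cycles
      pvOuterB hierarchy rest r.1 r.2

def detect_cycles_readonly_py_alt (hierarchy : List (String × List (String × String))) : List (List String) :=
  pvOuterB hierarchy hierarchy [] []

-- ===== PRECONDITION & SPEC =====
def Spec_detect_cycles_readonly_py (hierarchy : List (String × List (String × String))) (out : List (List String)) : Prop := out = detect_cycles_readonly_py_alt hierarchy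
instance (hierarchy : List (String × List (String × String))) (out : List (List String)) : Decidable (Spec_detect_cycles_readonly_py hierarchy out) := by unfold Spec_detect_cycles_readonly_py; infer_instance

-- ===== CLAIM (what is proved, stated in full; the proofs are below) =====
def Claim_equal_detect_cycles_readonly_py : Prop := ∀ (hierarchy : List (String × List (String × String))), Dom_detect_cycles_readonly_py hierarchy → Spec_detect_cycles_readonly_py hierarchy (detect_cycles_readonly_py hierarchy)

-- ===== LEMMAS AND PROOFS =====

theorem pv_index?_append_singleton_of_ne {c x : String} (l : List String) (h : c ≠ x) :
    PySem.List.index? (l ++ [x]) c = PySem.List.index? l c := by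
  simp [PySem.List.index?_eq_idxOf?, List.idxOf?, List.findIdx?_append,
    beq_iff_eq, Ne.symm h]

theorem pv_walk_eq (hierarchy : List (String × List (String × String))) :
    ∀ (fuel : Nat) (code : String) (path : List String)
      (in_stack : PySem.Set String) (pos : PySem.Dict String Int)
      (visited : PySem.Set String) (cycles : List (List String)),
      (∀ c, PySem.Set.contains in_stack c = path.contains c) →
      (∀ c, PySem.Dict.get? pos c = (PySem.List.index? path c).map (fun n => Int.ofNat n)) →
      pvDfsA hierarchy fuel code path visited in_stack cycles
        = pvWalkB hierarchy fuel code path pos visited cycles := by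
  intro fuel
  induction fuel with
  | zero => intros; rfl
  | succ fuel ih =>
    intro code path in_stack pos visited cycles hstk hpos
    by_cases hmem : code ∈ path
    · have h1 : PySem.Set.contains in_stack code = true := by
        rw [hstk code]; exact List.contains_iff_mem.mpr hmem
      obtain ⟨i, hi⟩ := Option.isSome_iff_exists.mp
        ((PySem.List.index?_isSome_iff path code).mpr hmem)
      simp only [pvDfsA, pvWalkB, h1, if_true, hi, hpos code, Option.map_some,
        Int.ofNat_eq_natCast]
    · have h1 : PySem.Set.contains in_stack code = false := by
        rw [hstk code]
        exact (Bool.not_eq_true _).mp (fun hc => hmem (List.contains_iff_mem.mp hc))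
      have hidx : PySem.List.index? path code = none :=
        (PySem.List.index?_eq_none_iff path code).mpr hmem
      simp only [pvDfsA, pvWalkB, h1, Bool.false_eq_true, if_false, hpos code, hidx,
        Option.map_none]
      by_cases hv : PySem.Set.contains visited code = true
      · rw [if_pos hv, if_pos hv]
      · rw [if_neg hv, if_neg hv]
        have hstk' : ∀ c, PySem.Set.contains (PySem.Set.add in_stack code) c
            = (path ++ [code]).contains c := by
          intro c
          have h1l : List.contains in_stack code = false := h1
          have hstkc : List.contains in_stack c = List.contains path c := hstk c
          simp only [PySem.Set.add, PySem.Set.contains, h1l, Bool.false_eq_true, if_false,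
            List.contains_append, hstkc]
        have hpos' : ∀ c, PySem.Dict.get? (PySem.Dict.insert pos code (path.length : Int)) c
            = (PySem.List.index? (path ++ [code]) c).map (fun n => Int.ofNat n) := by
          intro c
          rw [PySem.Dict.get?_insert]
          by_cases hcc : c = code
          · subst hcc
            rw [if_pos rfl, PySem.List.index?_append_singleton_self path c hmem,
              Option.map_some, Int.ofNat_eq_natCast]
          · rw [if_neg hcc, hpos c, pv_index?_append_singleton_of_ne path hcc]
        cases hpar : List.lookup "parent_code" ((List.lookup code hierarchy).getD []) with
        | none => rfl
        | some parent =>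
          dsimp only
          by_cases hg : parent ≠ "" ∧ (List.lookup parent hierarchy).isSome = true
          · rw [if_pos hg, if_pos hg]
            exact ih parent (path ++ [code]) _ _ _ cycles hstk' hpos'
          · rw [if_neg hg, if_neg hg]

theorem pv_outer_eq (hierarchy : List (String × List (String × String))) :
    ∀ (l : List (String × List (String × String))) (visited : PySem.Set String) (cycles : List (List String)),
      (l.foldl
        (fun (st : PySem.Set String × List (List String)) kv =>
          if PySem.Set.contains st.1 kv.1 then st
          else pvDfsA hierarchy (hierarchy.length + 1) kv.1 [] st.1 [] st.2)
        (visited, cycles)).2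
        = pvOuterB hierarchy l visited cycles := by
  intro l
  induction l with
  | nil => intro visited cycles; rfl
  | cons kv rest ih =>
    intro visited cycles
    simp only [List.foldl_cons, pvOuterB]
    by_cases hv : PySem.Set.contains visited kv.1 = true
    · simp only [hv, if_true]; exact ih visited cycles
    · simp only [hv]
      rw [pv_walk_eq hierarchy (hierarchy.length + 1) kv.1 [] [] PySem.Dict.empty visited cycles
        (fun c => rfl) (fun c => by simp [PySem.Dict.get?_empty])]
      exact ih _ _

-- ===== VERDICT (by name: the statement is the Claim_ definition above) =====
theorem detect_cycles_readonly_py_spec : Claim_equal_detect_cycles_readonly_py := by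
  intro hierarchy _
  unfold Spec_detect_cycles_readonly_py detect_cycles_readonly_py detect_cycles_readonly_py_alt
  by_cases h : hierarchy = []
  · subst h; rfl
  · simp only [h, if_false]
    exact pv_outer_eq hierarchy hierarchy [] []
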